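-- pv_equiv track=rewrite | github.com/thejasmeetsingh/Competitive-programming | leetcode/hash-table/brick_wall.py | leastBricks
-- ===== SOURCE A (Python) =====
-- def leastBricks(wall: list) -> int:
--     sum_map, max_sum = {}, 0
--     for i in range(len(wall)):
--         curr_sum = 0
--         for j in range(len(wall[i])-1):
--             curr_sum += wall[i][j]
--             if curr_sum not in sum_map:
--                 sum_map[curr_sum] = 0
--             sum_map[curr_sum] += 1
--             max_sum = max(max_sum, sum_map[curr_sum])
--     return len(wall) - max_sum
-- ===== SOURCE B (Python) =====
-- def leastBricks(wall: list) -> int: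
--     def prefix_edges(row):
--         out, s = [], 0
--         for x in row[:-1]:
--             s += x
--             out.append(s)
--         return out
--
--     edges = [e for row in wall for e in prefix_edges(row)]
--     prev, run, best = None, 0, 0
--     for e in sorted(edges):
--         run = run + 1 if prev == e else 1
--         prev = e
--         best = max(best, run)
--     return len(wall) - best
-- ===== Notes on version B (the rewrite author's own statement) =====
-- stated objective: alternative
-- what changed: Replaces the dict-of-counts with interleaved running max by a two-phase pipeline: flatten every row's prefix-sum edge offsets into one list, sort it, and find the mode's multiplicity as the longest run of equal values in a single scan (no hash map, no state threaded across rows).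
import Mathlib
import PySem

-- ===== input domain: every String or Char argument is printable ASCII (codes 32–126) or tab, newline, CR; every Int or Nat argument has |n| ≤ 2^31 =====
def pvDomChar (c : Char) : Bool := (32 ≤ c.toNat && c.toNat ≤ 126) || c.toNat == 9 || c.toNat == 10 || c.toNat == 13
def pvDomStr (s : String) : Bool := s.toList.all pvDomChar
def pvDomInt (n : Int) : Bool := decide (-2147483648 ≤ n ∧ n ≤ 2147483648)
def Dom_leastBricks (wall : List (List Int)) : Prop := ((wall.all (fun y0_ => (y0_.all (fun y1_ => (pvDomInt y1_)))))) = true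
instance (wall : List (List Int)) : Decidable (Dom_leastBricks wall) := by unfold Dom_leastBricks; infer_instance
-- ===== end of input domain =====

-- B replaces A's dict-of-counts with interleaved running max by a two-phase
-- pipeline: flatten the edge offsets, sort them, and take the longest run of
-- equal values in one scan (alternative decomposition, not claimed faster).

-- ===== PORT A =====
-- inner 'for j in range(len(wall[i])-1)' loop of A; state (curr_sum, (sum_map, max_sum))
def aInner (row : List Int) (st : PySem.Dict Int Int × Int) : PySem.Dict Int Int × Int :=
  ((PySem.List.pyRange 0 (PySem.List.len row - 1) 1).foldl
    (fun (s : Int × PySem.Dict Int Int × Int) j =>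
      let c := s.1 + PySem.List.pyGetD row j 0
      let d := s.2.1
      let d1 := if !(PySem.Dict.contains d c) then PySem.Dict.insert d c 0 else d
      let d2 := PySem.Dict.insert d1 c (PySem.Dict.getD d1 c 0 + 1)
      (c, (d2, max s.2.2 (PySem.Dict.getD d2 c 0))))
    (0, st)).2

def leastBricks (wall : List (List Int)) : Int :=
  PySem.List.len wall -
    ((PySem.List.pyRange 0 (PySem.List.len wall) 1).foldl
      (fun st i => aInner (PySem.List.pyGetD wall i []) st)
      (PySem.Dict.empty, 0)).2

-- ===== PORT B =====
-- prefix_edges(row): running prefix sums of row[:-1]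
def prefixEdgesAlt (row : List Int) : List Int :=
  ((PySem.List.slice row none (some (-1))).foldl
    (fun (s : List Int × Int) x => (s.1 ++ [s.2 + x], s.2 + x)) ([], 0)).1

def leastBricks_alt (wall : List (List Int)) : Int :=
  let edges := wall.flatMap prefixEdgesAlt
  let st := (PySem.List.sorted edges (fun x => x) false).foldl
    (fun (st : Option Int × Int × Int) e =>
      let run := if st.1 = some e then st.2.1 + 1 else 1
      (some e, run, max st.2.2 run)) (none, 0, 0)
  PySem.List.len wall - st.2.2

-- ===== PRECONDITION & SPEC =====
def Spec_leastBricks (wall : List (List Int)) (out : Int) : Prop := out = leastBricks_alt wall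
instance (wall : List (List Int)) (out : Int) : Decidable (Spec_leastBricks wall out) := by unfold Spec_leastBricks; infer_instance

-- ===== CLAIM (what is proved, stated in full; the proofs are below) =====
def Claim_equal_leastBricks : Prop := ∀ (wall : List (List Int)), Dom_leastBricks wall → Spec_leastBricks wall (leastBricks wall)

-- ===== LEMMAS AND PROOFS =====

-- prefix sums of xs starting from accumulator c
def peAux (c : Int) : List Int → List Int
  | [] => []
  | x :: xs => (c + x) :: peAux (c + x) xs

-- all edge offsets of the wall, row by row
def allEdges (wall : List (List Int)) : List Int :=
  wall.flatMap (fun row => peAux 0 row.dropLast)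

-- running max of f over a list (from the right), starting at 0
def rmax (f : Int → Nat) : List Int → Nat
  | [] => 0
  | x :: xs => max (f x) (rmax f xs)

-- multiplicity of the most frequent element (0 for [])
def maxMult (l : List Int) : Nat := rmax (fun e => l.count e) l

-- A's per-edge update of (sum_map, max_sum)
def updA (st : PySem.Dict Int Int × Int) (c : Int) : PySem.Dict Int Int × Int :=
  let d := st.1
  let d1 := if !(PySem.Dict.contains d c) then PySem.Dict.insert d c 0 else d
  let d2 := PySem.Dict.insert d1 c (PySem.Dict.getD d1 c 0 + 1)
  (d2, max st.2 (PySem.Dict.getD d2 c 0))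

lemma rmax_append (f : Int → Nat) (p : List Int) (x : Int) :
    rmax f (p ++ [x]) = max (rmax f p) (f x) := by
  induction p with
  | nil => simp [rmax]
  | cons a p ih => simp [rmax, ih]

lemma rmax_congr_bound (f g : Int → Nat) (K : Nat) :
    ∀ p : List Int, (∀ e ∈ p, g e ≤ f e ∧ f e ≤ max (g e) K) →
      max (rmax f p) K = max (rmax g p) K := by
  intro p
  induction p with
  | nil => intro _; rfl
  | cons a p ih =>
    intro h
    have ha := h a (by simp)
    have ih' := ih (fun e he => h e (by simp [he]))
    simp only [rmax]
    omega

lemma maxMult_snoc (p : List Int) (x : Int) :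
    maxMult (p ++ [x]) = max (maxMult p) (p.count x + 1) := by
  have hx : (p ++ [x]).count x = p.count x + 1 := by
    simp [List.count_append]
  have h1 : maxMult (p ++ [x]) = max (rmax (fun e => (p ++ [x]).count e) p) ((p ++ [x]).count x) := by
    unfold maxMult
    rw [rmax_append]
  rw [h1, hx]
  have h2 := rmax_congr_bound (fun e => (p ++ [x]).count e) (fun e => p.count e) (p.count x + 1) p ?_
  · unfold maxMult; omega
  · intro e _
    by_cases hex : e = x
    · subst hex
      simp [List.count_append]
    · have hxe : x ≠ e := fun h => hex h.symm
      simp [List.count_append, hxe]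

-- invariant of A's per-edge loop: the dict holds the counts of the processed
-- prefix p and max_sum is the largest multiplicity seen
lemma foldl_updA (l : List Int) : ∀ (p : List Int) (d : PySem.Dict Int Int) (m : Int),
    (∀ k, PySem.Dict.getD d k 0 = (p.count k : Int)) → m = (maxMult p : Int) →
      (∀ k, PySem.Dict.getD (l.foldl updA (d, m)).1 k 0 = ((p ++ l).count k : Int)) ∧
      (l.foldl updA (d, m)).2 = (maxMult (p ++ l) : Int) := by
  induction l with
  | nil => intro p d m hc hm; simpa using ⟨hc, hm⟩
  | cons x l ih =>
    intro p d m hc hm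
    simp only [List.foldl_cons]
    have hd1 : ∀ k, PySem.Dict.getD
        (if !(PySem.Dict.contains d x) then PySem.Dict.insert d x 0 else d) k 0
        = (p.count k : Int) := by
      intro k
      by_cases hcont : PySem.Dict.contains d x
      · simp [hcont, hc k]
      · simp only [hcont, Bool.not_false, if_pos]
        rw [PySem.Dict.getD_insert]
        split_ifs with hk
        · subst hk
          have := hc k
          rw [PySem.Dict.getD_of_not_contains d 0 (by simpa using hcont)] at this
          omega
        · exact hc k
    have hstep : updA (d, m) x =
        ((if !(PySem.Dict.contains d x) then PySem.Dict.insert d x 0 else d).insert x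
          ((p.count x : Int) + 1),
          max m ((p.count x : Int) + 1)) := by
      simp only [updA]
      rw [hd1 x, PySem.Dict.getD_insert_self]
    rw [hstep]
    have hc' : ∀ k, PySem.Dict.getD
        ((if !(PySem.Dict.contains d x) then PySem.Dict.insert d x 0 else d).insert x
          ((p.count x : Int) + 1)) k 0 = ((p ++ [x]).count k : Int) := by
      intro k
      rw [PySem.Dict.getD_insert]
      by_cases hk : k = x
      · rw [if_pos hk, hk]
        simp [List.count_append]
      · rw [if_neg hk, hd1 k]
        have hxk : x ≠ k := fun h => hk h.symm
        simp [List.count_append, hxk]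
    have hm' : max m ((p.count x : Int) + 1) = (maxMult (p ++ [x]) : Int) := by
      rw [hm, maxMult_snoc]
      push_cast
      omega
    have := ih (p ++ [x]) _ _ hc' hm'
    simpa [List.append_assoc] using this

-- folding over range m with getD = folding over take m
lemma foldl_range_getD {α β : Type} (dflt : α) (F : β → α → β) :
    ∀ (m : Nat) (xs : List α) (init : β), m ≤ xs.length →
      (List.range m).foldl (fun s k => F s (xs.getD k dflt)) init = (xs.take m).foldl F init := by
  intro m
  induction m with
  | zero => intro xs init _; simp
  | succ m ih =>
    intro xs init hm
    have hlt : m < xs.length := by omega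
    rw [List.range_succ, List.foldl_append, ih xs init (by omega),
        List.take_add_one, List.foldl_append, List.getElem?_eq_getElem hlt]
    simp [List.getD, List.getElem?_eq_getElem hlt]

-- a 'for i in range(len(xs))' loop over xs[i] is a loop over xs
lemma foldl_pyRange_len {α β : Type} (dflt : α) (F : β → α → β) (xs : List α) (init : β) :
    (PySem.List.pyRange 0 (PySem.List.len xs) 1).foldl
      (fun s i => F s (PySem.List.pyGetD xs i dflt)) init = xs.foldl F init := by
  rw [PySem.List.pyRange_one, List.foldl_map]
  have h0 : (PySem.List.len xs - 0).toNat = xs.length := by simp [PySem.List.len_eq]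
  rw [h0]
  rw [PySem.List.foldl_congr_mem _ _ (fun s k => F s (xs.getD k dflt)) init
       (by intro s k _; rw [zero_add, PySem.List.pyGetD_natCast])]
  rw [foldl_range_getD dflt F xs.length xs init (le_refl _), List.take_length]

-- same for the inner range(len(row)-1): it folds over dropLast
lemma foldl_pyRange_len_sub_one {β : Type} (F : β → Int → β) (row : List Int) (init : β) :
    (PySem.List.pyRange 0 (PySem.List.len row - 1) 1).foldl
      (fun s j => F s (PySem.List.pyGetD row j 0)) init = row.dropLast.foldl F init := by
  rw [PySem.List.pyRange_one, List.foldl_map]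
  have h0 : (PySem.List.len row - 1 - 0).toNat = row.length - 1 := by
    simp [PySem.List.len_eq]
  rw [h0]
  rw [PySem.List.foldl_congr_mem _ _ (fun s k => F s (row.getD k 0)) init
       (by intro s k _; rw [zero_add, PySem.List.pyGetD_natCast])]
  rw [foldl_range_getD 0 F (row.length - 1) row init (by omega), List.dropLast_eq_take]

-- the inner (curr_sum, st) loop is updA folded over the prefix sums
lemma foldl_curr_sum (xs : List Int) : ∀ (c : Int) (st : PySem.Dict Int Int × Int),
    (xs.foldl
      (fun (s : Int × PySem.Dict Int Int × Int) x =>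
        let c' := s.1 + x
        let d := s.2.1
        let d1 := if !(PySem.Dict.contains d c') then PySem.Dict.insert d c' 0 else d
        let d2 := PySem.Dict.insert d1 c' (PySem.Dict.getD d1 c' 0 + 1)
        (c', (d2, max s.2.2 (PySem.Dict.getD d2 c' 0))))
      (c, st)).2 = (peAux c xs).foldl updA st := by
  induction xs with
  | nil => intro c st; rfl
  | cons x xs ih =>
    intro c st
    simp only [List.foldl_cons, peAux]
    exact ih (c + x) _

lemma aInner_eq (row : List Int) (st : PySem.Dict Int Int × Int) :
    aInner row st = (peAux 0 row.dropLast).foldl updA st := by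
  unfold aInner
  rw [foldl_pyRange_len_sub_one
    (F := fun (s : Int × PySem.Dict Int Int × Int) x =>
      let c' := s.1 + x
      let d := s.2.1
      let d1 := if !(PySem.Dict.contains d c') then PySem.Dict.insert d c' 0 else d
      let d2 := PySem.Dict.insert d1 c' (PySem.Dict.getD d1 c' 0 + 1)
      (c', (d2, max s.2.2 (PySem.Dict.getD d2 c' 0))))]
  exact foldl_curr_sum row.dropLast 0 st

lemma foldl_flatMap {α β γ : Type} (g : α → List β) (F : γ → β → γ) :
    ∀ (l : List α) (init : γ),
      l.foldl (fun st a => (g a).foldl F st) init = (l.flatMap g).foldl F init := by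
  intro l
  induction l with
  | nil => intro init; rfl
  | cons a l ih => intro init; simp [List.foldl_append, ih]

-- B's prefix-edge builder computes peAux over dropLast
lemma foldl_build (xs : List Int) : ∀ (o : List Int) (c : Int),
    (xs.foldl (fun (s : List Int × Int) x => (s.1 ++ [s.2 + x], s.2 + x)) (o, c)).1
      = o ++ peAux c xs := by
  induction xs with
  | nil => intro o c; simp [peAux]
  | cons x xs ih =>
    intro o c
    simp only [List.foldl_cons, peAux]
    rw [ih]
    simp

lemma prefixEdgesAlt_eq (row : List Int) : prefixEdgesAlt row = peAux 0 row.dropLast := by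
  unfold prefixEdgesAlt
  rw [PySem.List.slice_to_neg_one, foldl_build]
  simp


def rmaxI (f : Int → Int) : List Int → Int
  | [] => 0
  | x :: xs => max (f x) (rmaxI f xs)

def runN (prev : Option Int) (r : Int) : List Int → Int
  | [] => 0
  | e :: s =>
    let r' := if prev = some e then r + 1 else 1
    max r' (runN (some e) r' s)

lemma scan_split : ∀ (s : List Int) (prev : Option Int) (r b : Int), 0 ≤ b →
    (s.foldl (fun (st : Option Int × Int × Int) e =>
        let run := if st.1 = some e then st.2.1 + 1 else 1
        (some e, run, max st.2.2 run)) (prev, r, b)).2.2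
      = max b (runN prev r s) := by
  intro s
  induction s with
  | nil => intro prev r b hb; simp [runN]; omega
  | cons e s ih =>
    intro prev r b hb
    simp only [List.foldl_cons, runN]
    rw [ih _ _ _ (by omega)]
    omega

lemma le_rmaxI_of_mem (f : Int → Int) : ∀ (l : List Int) (e : Int), e ∈ l → f e ≤ rmaxI f l := by
  intro l
  induction l with
  | nil => intro e h; simp at h
  | cons x l ih =>
    intro e h
    rcases List.mem_cons.mp h with h | h
    · subst h; simp [rmaxI]
    · have := ih e h; simp [rmaxI]; omega

lemma rmaxI_congr_mem (f g : Int → Int) : ∀ (l : List Int), (∀ e ∈ l, f e = g e) → rmaxI f l = rmaxI g l := by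
  intro l
  induction l with
  | nil => intro _; rfl
  | cons x l ih =>
    intro h
    simp only [rmaxI, h x (by simp), ih (fun e he => h e (by simp [he]))]

lemma rmaxI_perm (f : Int → Int) {l l' : List Int} (h : l.Perm l') : rmaxI f l = rmaxI f l' := by
  induction h with
  | nil => rfl
  | cons x _ ih => simp [rmaxI, ih]
  | swap x y l => simp [rmaxI]; omega
  | trans _ _ ih1 ih2 => omega

lemma runN_sorted : ∀ (s : List Int), s.Pairwise (· ≤ ·) → ∀ (a r : Int), 1 ≤ r → (∀ e ∈ s, a ≤ e) →
    runN (some a) r s = rmaxI (fun v => (s.count v : Int) + if v = a then r else 0) s := by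
  intro s
  induction s with
  | nil => intro _ a r _ _; rfl
  | cons e s ih =>
    intro hp a r hr hle
    have hp' := (List.pairwise_cons.mp hp).2
    have hhead := (List.pairwise_cons.mp hp).1
    by_cases hae : a = e
    · -- run continues
      subst hae
      simp only [runN, reduceIte]
      rw [ih hp' a (r + 1) (by omega) hhead]
      have hcongr : rmaxI (fun v => (s.count v : Int) + if v = a then r + 1 else 0) s
          = rmaxI (fun v => ((a :: s).count v : Int) + if v = a then r else 0) s := by
        apply rmaxI_congr_mem
        intro v _
        by_cases hv : v = a
        · subst hv; simp; ring
        · simp [hv, Ne.symm hv]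
      rw [hcongr]
      simp only [rmaxI, reduceIte]
      have hc : ((a :: s).count a : Int) = (s.count a : Int) + 1 := by
        simp
      rw [hc]
      by_cases hmem : a ∈ s
      · have h1 := le_rmaxI_of_mem (fun v => ((a :: s).count v : Int) + if v = a then r else 0) s a hmem
        simp only [reduceIte, hc] at h1
        have h2 : (0:Int) ≤ (s.count a : Int) := by positivity
        omega
      · have h0 : s.count a = 0 := List.count_eq_zero.mpr hmem
        rw [h0]
        omega
    · -- new run of length 1; a occurs nowhere in e :: s
      have hane : ¬ ((some a : Option Int) = some e) := by simp [hae]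
      simp only [runN, if_neg hane]
      rw [ih hp' e 1 (le_refl _) hhead]
      have hnota : ∀ v ∈ e :: s, v ≠ a := by
        intro v hv hva
        have h1 : a ≤ e := hle e (by simp)
        rcases List.mem_cons.mp hv with h | h
        · exact hae (by rw [← hva]; exact h)
        · have h2 : e ≤ a := by rw [← hva]; exact hhead v h
          exact hae (le_antisymm h1 h2)
      have hcongr : rmaxI (fun v => ((e :: s).count v : Int) + if v = a then r else 0) (e :: s)
          = rmaxI (fun v => ((e :: s).count v : Int)) (e :: s) := by
        apply rmaxI_congr_mem
        intro v hv
        simp [hnota v hv]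
      rw [hcongr]
      have hcongr2 : rmaxI (fun v => (s.count v : Int) + if v = e then 1 else 0) s
          = rmaxI (fun v => ((e :: s).count v : Int)) s := by
        apply rmaxI_congr_mem
        intro v _
        by_cases hv : v = e
        · subst hv; simp
        · simp [hv, Ne.symm hv]
      rw [hcongr2]
      simp only [rmaxI]
      have hc : ((e :: s).count e : Int) = (s.count e : Int) + 1 := by
        simp
      rw [hc]
      by_cases hmem : e ∈ s
      · have h1 := le_rmaxI_of_mem (fun v => ((e :: s).count v : Int)) s e hmem
        simp only [hc] at h1
        have h2 : (0:Int) ≤ (s.count e : Int) := by positivity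
        omega
      · have h0 : s.count e = 0 := List.count_eq_zero.mpr hmem
        rw [h0]
        omega

lemma runN_none : ∀ (s : List Int), s.Pairwise (· ≤ ·) →
    runN none 0 s = rmaxI (fun v => (s.count v : Int)) s := by
  intro s hs
  cases s with
  | nil => rfl
  | cons e s =>
    have hp' := (List.pairwise_cons.mp hs).2
    have hhead := (List.pairwise_cons.mp hs).1
    simp only [runN, reduceCtorEq, reduceIte]
    rw [runN_sorted s hp' e 1 (le_refl _) hhead]
    have hcongr2 : rmaxI (fun v => (s.count v : Int) + if v = e then 1 else 0) s
        = rmaxI (fun v => ((e :: s).count v : Int)) s := by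
      apply rmaxI_congr_mem
      intro v _
      by_cases hv : v = e
      · subst hv; simp
      · simp [hv, Ne.symm hv]
    rw [hcongr2]
    simp only [rmaxI]
    have hc : ((e :: s).count e : Int) = (s.count e : Int) + 1 := by
      simp
    rw [hc]
    by_cases hmem : e ∈ s
    · have h1 := le_rmaxI_of_mem (fun v => ((e :: s).count v : Int)) s e hmem
      simp only [hc] at h1
      have h2 : (0:Int) ≤ (s.count e : Int) := by positivity
      omega
    · have h0 : s.count e = 0 := List.count_eq_zero.mpr hmem
      rw [h0]
      omega

-- cast bridge: the Int-valued running max of Nat counts is the Nat one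
lemma rmaxI_cast (g : Int → Nat) : ∀ (l : List Int),
    rmaxI (fun e => ((g e : Nat) : Int)) l = ((rmax g l : Nat) : Int) := by
  intro l
  induction l with
  | nil => rfl
  | cons x l ih =>
    simp only [rmaxI, rmax, ih]
    push_cast [Nat.cast_max]
    omega

lemma alt_eq_maxMult (wall : List (List Int)) :
    leastBricks_alt wall = PySem.List.len wall - (maxMult (allEdges wall) : Int) := by
  simp only [leastBricks_alt]
  have he : wall.flatMap prefixEdgesAlt = allEdges wall := by
    unfold allEdges
    exact List.flatMap_congr (fun row _ => prefixEdgesAlt_eq row)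
  rw [he]
  rw [scan_split _ none 0 0 (le_refl 0)]
  have hpw : (PySem.List.sorted (allEdges wall) (fun x => x) false).Pairwise (· ≤ ·) := by
    simpa using PySem.List.sorted_pairwise (allEdges wall) (fun x => x)
  rw [runN_none _ hpw]
  have hperm := PySem.List.sorted_perm (allEdges wall) (fun x => x) false
  have hcnt : rmaxI (fun v => ((PySem.List.sorted (allEdges wall) (fun x => x) false).count v : Int))
      (PySem.List.sorted (allEdges wall) (fun x => x) false)
      = rmaxI (fun v => ((allEdges wall).count v : Int))
        (PySem.List.sorted (allEdges wall) (fun x => x) false) := by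
    apply rmaxI_congr_mem
    intro v _
    rw [hperm.count_eq]
  rw [hcnt, rmaxI_perm _ hperm, rmaxI_cast (fun v => (allEdges wall).count v) (allEdges wall)]
  have hnn : (0:Int) ≤ ((maxMult (allEdges wall) : Nat) : Int) := by positivity
  unfold maxMult
  omega

lemma a_eq_maxMult (wall : List (List Int)) :
    leastBricks wall = PySem.List.len wall - (maxMult (allEdges wall) : Int) := by
  unfold leastBricks
  rw [foldl_pyRange_len (dflt := ([] : List Int)) (F := fun st row => aInner row st)]
  have h1 : wall.foldl (fun st row => aInner row st) (PySem.Dict.empty, 0)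
      = (allEdges wall).foldl updA (PySem.Dict.empty, 0) := by
    calc wall.foldl (fun st row => aInner row st) (PySem.Dict.empty, 0)
        = wall.foldl (fun st row => (peAux 0 row.dropLast).foldl updA st) (PySem.Dict.empty, 0) := by
          apply PySem.List.foldl_congr_mem
          intro st row _
          exact aInner_eq row st
      _ = (allEdges wall).foldl updA (PySem.Dict.empty, 0) :=
          foldl_flatMap (fun row => peAux 0 row.dropLast) updA wall _
  rw [h1]
  have h2 := foldl_updA (allEdges wall) [] PySem.Dict.empty 0
    (by intro k; simp [PySem.Dict.getD_empty]) (by simp [maxMult, rmax])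
  rw [h2.2]
  simp

-- ===== VERDICT (by name: the statement is the Claim_ definition above) =====
theorem leastBricks_spec : Claim_equal_leastBricks := by
  intro wall _
  unfold Spec_leastBricks
  rw [a_eq_maxMult, alt_eq_maxMult]
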